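-- pv_equiv track=rewrite | github.com/dangvanthin/demoluanvan | app.py | normalize_elonge_word
-- ===== SOURCE A (Python) =====
-- def normalize_elonge_word(sent):
--     s_new = ''
--     for word in sent.split(' '):
--         word_new = ' '
--         for char in word.strip():
--             if char != word_new[-1]:
--                 word_new += char
--         s_new += word_new.strip() + ' '
--     return s_new.strip()
-- ===== SOURCE B (Python) =====
-- def normalize_elonge_word(sent):
--     # Single pass over the characters with a small state machine: no split(),
--     # no per-word strip() calls.  buf holds the collapsed content of the word
--     # being read (leading whitespace skipped), pending holds a collapsed run of
--     # whitespace seen after content (flushed only if more content follows, so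
--     # trailing whitespace of a word is dropped).  ' ' is the word separator.
--     words = []
--     buf = []        # collapsed chars of the current stripped word
--     pending = []    # collapsed whitespace run awaiting a non-whitespace char
--     for c in sent:
--         if c == ' ':
--             words.append(''.join(buf))
--             buf = []
--             pending = []
--         elif c.isspace():
--             if buf:  # whitespace before any content is stripped
--                 last = (pending or buf)[-1]
--                 if c != last:
--                     pending.append(c)
--         else:
--             if pending:
--                 buf.extend(pending)
--                 pending = []
--             if not buf or c != buf[-1]:
--                 buf.append(c)
--     words.append(''.join(buf))
--     # the final strip(): drop empty words at both ends, then join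
--     while words and not words[0]:
--         words.pop(0)
--     while words and not words[-1]:
--         words.pop()
--     return ' '.join(words)
-- ===== Notes on version B (the rewrite author's own statement) =====
-- stated objective: alternative
-- what changed: B replaces A's split-on-space with nested per-word collapse loops and trailing-space string concatenation by a single character-level state machine over the whole sentence (a words/buf/pending accumulator that strips and collapses on the fly), with the final strip done by trimming empty words before one join.
import Mathlib
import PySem

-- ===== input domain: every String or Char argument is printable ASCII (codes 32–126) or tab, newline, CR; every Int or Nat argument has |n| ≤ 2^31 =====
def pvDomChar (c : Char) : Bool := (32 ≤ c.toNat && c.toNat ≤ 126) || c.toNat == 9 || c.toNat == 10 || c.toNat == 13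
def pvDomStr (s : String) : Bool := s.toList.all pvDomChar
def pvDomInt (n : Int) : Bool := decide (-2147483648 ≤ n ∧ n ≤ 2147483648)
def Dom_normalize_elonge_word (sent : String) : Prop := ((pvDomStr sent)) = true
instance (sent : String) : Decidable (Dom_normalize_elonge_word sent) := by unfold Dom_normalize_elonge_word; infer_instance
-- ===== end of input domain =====

-- B replaces A's split-into-words + nested per-word collapse loops by a single character-level state
-- machine (words/buf/pending accumulator) with one final join over trimmed words; objective: alternative.


-- ===== PORT A =====
-- literal transliteration of A: for each word of sent.split(' '), a fold that appends char when it
-- differs from word_new[-1] (word_new starts as ' '), then s_new += word_new.strip() + ' ', final strip.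
def normalize_elonge_word (sent : String) : String :=
  let s_new : List Char :=
    (PySem.Chars.splitOn sent.toList [' ']).foldl
      (fun s_new word =>
        let word_new : List Char :=
          (PySem.Chars.strip word).foldl
            (fun word_new char =>
              if some char ≠ PySem.List.pyGet? word_new (-1) then word_new ++ [char] else word_new)
            [' ']
        s_new ++ PySem.Chars.strip word_new ++ [' '])
      []
  String.ofList (PySem.Chars.strip s_new)

-- ===== PORT B =====
-- B's loop body: state = (words so far, collapsed buffer of the current word, pending collapsed
-- whitespace run); exact transliteration of the for-loop in Source B.
def pvStepB (st : List (List Char) × List Char × List Char) (c : Char) :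
    List (List Char) × List Char × List Char :=
  let (words, buf, pend) := st
  if c = ' ' then
    (words ++ [buf], [], [])
  else if PySem.Chars.isspace c then
    if buf ≠ [] then
      let last := (if pend ≠ [] then pend else buf).getLast?
      if some c ≠ last then (words, buf, pend ++ [c]) else (words, buf, pend)
    else (words, buf, pend)
  else
    let buf1 := if pend ≠ [] then buf ++ pend else buf
    if buf1 = [] ∨ some c ≠ buf1.getLast? then (words, buf1 ++ [c], ([] : List Char))
    else (words, buf1, ([] : List Char))

-- literal transliteration of B: one fold over the characters, append the last buffer,
-- drop empty words at both ends (the two while-pop loops), join with ' '.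
def normalize_elonge_word_alt (sent : String) : String :=
  let st := sent.toList.foldl pvStepB ([], [], [])
  let words := st.1 ++ [st.2.1]
  let words := words.dropWhile (·.isEmpty)
  let words := (words.reverse.dropWhile (·.isEmpty)).reverse
  String.ofList (PySem.Chars.join [' '] words)

-- ===== PRECONDITION & SPEC =====
def Spec_normalize_elonge_word (sent : String) (out : String) : Prop := out = normalize_elonge_word_alt sent
instance (sent : String) (out : String) : Decidable (Spec_normalize_elonge_word sent out) := by unfold Spec_normalize_elonge_word; infer_instance

-- ===== CLAIM (what is proved, stated in full; the proofs are below) =====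
def Claim_equal_normalize_elonge_word : Prop := ∀ (sent : String), Dom_normalize_elonge_word sent → Spec_normalize_elonge_word sent (normalize_elonge_word sent)

-- ===== LEMMAS AND PROOFS =====

-- collapse of consecutive duplicates, relative to the previously kept character l
def pvColA (l : Char) : List Char → List Char
  | [] => []
  | c :: rest => if c = l then pvColA l rest else c :: pvColA c rest

-- collapse of consecutive duplicates of a whole list (no previous character)
def pvColF : List Char → List Char
  | [] => []
  | c :: rest => c :: pvColA c rest

-- reference split on ' ' (structural recursion), and the tail-recursion bridge to PySem's splitOn
def pvMySplit : List Char → List (List Char)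
  | [] => [[]]
  | c :: rest =>
      if c = ' ' then [] :: pvMySplit rest
      else
        match pvMySplit rest with
        | [] => [[c]]
        | w :: ws => (c :: w) :: ws

def pvConsHead (p : List Char) : List (List Char) → List (List Char)
  | [] => [p]
  | w :: ws => (p ++ w) :: ws

lemma pvMySplit_ne_nil (l : List Char) : pvMySplit l ≠ [] := by
  cases l with
  | nil => simp [pvMySplit]
  | cons c rest =>
      simp only [pvMySplit]
      split_ifs
      · simp
      · cases h : pvMySplit rest <;> simp

lemma pvConsHead_nil (gs : List (List Char)) (h : gs ≠ []) : pvConsHead [] gs = gs := by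
  cases gs with
  | nil => exact absurd rfl h
  | cons w ws => simp [pvConsHead]

lemma pvGo (fuel : Nat) : ∀ (l cur : List Char) (accs : List (List Char)),
    l.length ≤ fuel →
    PySem.Chars.splitOn.go [' '] fuel l cur accs = accs.reverse ++ pvConsHead cur.reverse (pvMySplit l) := by
  induction fuel with
  | zero =>
      intro l cur accs hlen
      have hl : l = [] := by
        cases l with
        | nil => rfl
        | cons c t => simp at hlen
      subst hl
      rw [PySem.Chars.splitOn.go]
      simp [pvMySplit, pvConsHead]
  | succ f ih =>
      intro l cur accs hlen
      cases l with
      | nil =>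
          rw [PySem.Chars.splitOn.go]
          simp [pvMySplit, pvConsHead]
          omega
      | cons c rest =>
          rw [PySem.Chars.splitOn.go]
          have hlen' : rest.length ≤ f := by simpa using hlen
          by_cases hc : c = ' '
          · subst hc
            have hpre : [' '].isPrefixOf (' ' :: rest) = true := by simp [List.isPrefixOf]
            rw [if_pos hpre]
            simp only [List.length_singleton, List.drop_succ_cons, List.drop_zero]
            rw [ih rest [] (cur.reverse :: accs) hlen']
            have hsp : pvMySplit (' ' :: rest) = [] :: pvMySplit rest := by
              simp [pvMySplit]
            rw [hsp]
            simp only [List.reverse_nil]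
            rw [pvConsHead_nil _ (pvMySplit_ne_nil rest)]
            simp [pvConsHead]
          · have hpre : [' '].isPrefixOf (c :: rest) = false := by
              simp [List.isPrefixOf]
              exact fun h => absurd h.symm hc
            rw [if_neg (by simp [hpre])]
            rw [ih rest (c :: cur) accs hlen']
            have hsp : pvMySplit (c :: rest) =
                match pvMySplit rest with
                | [] => [[c]]
                | w :: ws => (c :: w) :: ws := by
              simp [pvMySplit, hc]
            rw [hsp]
            cases hm : pvMySplit rest with
            | nil => exact absurd hm (pvMySplit_ne_nil rest)
            | cons w ws => simp [pvConsHead]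

lemma pvSplitOn_eq (s : List Char) : PySem.Chars.splitOn s [' '] = pvMySplit s := by
  unfold PySem.Chars.splitOn
  rw [pvGo (s.length + 1) s [] [] (by omega)]
  simp [pvConsHead_nil _ (pvMySplit_ne_nil s)]

lemma pvMySplit_no_space (p : List Char) (h : ∀ c ∈ p, c ≠ ' ') : pvMySplit p = [p] := by
  induction p with
  | nil => rfl
  | cons c rest ih =>
      have hc : c ≠ ' ' := h c (by simp)
      simp only [pvMySplit, if_neg hc, ih (fun d hd => h d (by simp [hd]))]

lemma pvMySplit_append_space (p rest : List Char) (h : ∀ c ∈ p, c ≠ ' ') :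
    pvMySplit (p ++ ' ' :: rest) = p :: pvMySplit rest := by
  induction p with
  | nil => simp [pvMySplit]
  | cons c t ih =>
      have hc : c ≠ ' ' := h c (by simp)
      have := ih (fun d hd => h d (by simp [hd]))
      simp only [List.cons_append, pvMySplit, if_neg hc, this]

-- ---- collapse lemmas ----

lemma pvGetLast?_cons (d : Char) (t : List Char) :
    (d :: t).getLast? = some ((t.getLast?).getD d) := by
  cases t using List.reverseRecOn with
  | nil => rfl
  | append_singleton u a => rw [show d :: (u ++ [a]) = (d :: u) ++ [a] from rfl, List.getLast?_concat]; simp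

lemma pvColA_snoc (c : Char) (xs : List Char) : ∀ l : Char,
    pvColA l (xs ++ [c]) =
      if (xs.getLast?).getD l = c then pvColA l xs else pvColA l xs ++ [c] := by
  induction xs with
  | nil => intro l; by_cases h : c = l <;> simp [pvColA, h, eq_comm]
  | cons d t ih =>
      intro l
      by_cases h : d = l
      · subst h
        have e1 : pvColA d ((d :: t) ++ [c]) = pvColA d (t ++ [c]) := by simp [pvColA]
        have e2 : pvColA d (d :: t) = pvColA d t := by simp [pvColA]
        rw [e1, ih d, pvGetLast?_cons, Option.getD_some, e2]
      · have e1 : pvColA l ((d :: t) ++ [c]) = d :: pvColA d (t ++ [c]) := by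
          simp [pvColA, h]
        have e2 : pvColA l (d :: t) = d :: pvColA d t := by simp [pvColA, h]
        rw [e1, ih d, pvGetLast?_cons, Option.getD_some, e2]
        split_ifs <;> simp

lemma pvColF_snoc (c : Char) (xs : List Char) :
    pvColF (xs ++ [c]) = if xs.getLast? = some c then pvColF xs else pvColF xs ++ [c] := by
  cases xs with
  | nil => simp [pvColF, pvColA]
  | cons d t =>
      have e1 : pvColF ((d :: t) ++ [c]) = d :: pvColA d (t ++ [c]) := by simp [pvColF]
      have e2 : pvColF (d :: t) = d :: pvColA d t := by simp [pvColF]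
      rw [e1, pvColA_snoc c t d, e2, pvGetLast?_cons]
      split_ifs with h1 h2 h2 <;> simp_all

lemma pvColF_eq_nil_iff (xs : List Char) : pvColF xs = [] ↔ xs = [] := by
  cases xs <;> simp [pvColF]

lemma pvColF_head? (cs : List Char) : (pvColF cs).head? = cs.head? := by
  cases cs <;> simp [pvColF]

lemma pvColA_getLast? (rest : List Char) : ∀ c : Char,
    (c :: pvColA c rest).getLast? = (c :: rest).getLast? := by
  induction rest with
  | nil => intro c; rfl
  | cons d t ih =>
      intro c
      by_cases h : d = c
      · subst h
        have h1 : pvColA d (d :: t) = pvColA d t := by simp [pvColA]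
        rw [h1, ih d, List.getLast?_cons_cons]
      · have h1 : pvColA c (d :: t) = d :: pvColA d t := by simp [pvColA, h]
        rw [h1, List.getLast?_cons_cons, ih d, List.getLast?_cons_cons]

lemma pvColF_getLast? (cs : List Char) : (pvColF cs).getLast? = cs.getLast? := by
  cases cs with
  | nil => rfl
  | cons c rest => exact pvColA_getLast? rest c

-- ---- strip lemmas ----

lemma pvLstrip_eq_self (cs : List Char) (h : ∀ c ∈ cs.head?, PySem.Chars.isspace c = false) :
    PySem.Chars.lstrip cs = cs := by
  cases cs with
  | nil => rfl
  | cons c t =>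
      have := h c (by simp)
      simp [PySem.Chars.lstrip, this]

lemma pvRstrip_eq_self (cs : List Char) (h : ∀ c ∈ cs.getLast?, PySem.Chars.isspace c = false) :
    PySem.Chars.rstrip cs = cs := by
  unfold PySem.Chars.rstrip
  cases hr : cs.reverse with
  | nil => simpa using congrArg List.reverse hr
  | cons c t =>
      have hc : cs.getLast? = some c := by
        rw [← List.head?_reverse, hr]; rfl
      have := h c hc
      rw [List.dropWhile_cons, this]
      simp [← hr]

lemma pvRstrip_snoc_ws (x : List Char) (c : Char) (hc : PySem.Chars.isspace c = true) :
    PySem.Chars.rstrip (x ++ [c]) = PySem.Chars.rstrip x := by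
  unfold PySem.Chars.rstrip
  simp [hc]

lemma pvLstrip_snoc_nonws (p : List Char) (c : Char) (hc : PySem.Chars.isspace c = false) :
    PySem.Chars.lstrip (p ++ [c]) = PySem.Chars.lstrip p ++ [c] := by
  unfold PySem.Chars.lstrip
  rw [List.dropWhile_append]
  split_ifs with h
  · simp_all
  · rfl

lemma pvLstrip_snoc_ws_of_ne (p : List Char) (c : Char) (h : PySem.Chars.lstrip p ≠ []) :
    PySem.Chars.lstrip (p ++ [c]) = PySem.Chars.lstrip p ++ [c] := by
  unfold PySem.Chars.lstrip at *
  rw [List.dropWhile_append]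
  simp [List.isEmpty_iff, h]

lemma pvLstrip_snoc_ws_of_nil (p : List Char) (c : Char) (hc : PySem.Chars.isspace c = true)
    (h : PySem.Chars.lstrip p = []) : PySem.Chars.lstrip (p ++ [c]) = [] := by
  unfold PySem.Chars.lstrip at *
  rw [List.dropWhile_append]
  simp [h, hc]

lemma pvStrip_snoc_ws (p : List Char) (c : Char) (hc : PySem.Chars.isspace c = true) :
    PySem.Chars.strip (p ++ [c]) = PySem.Chars.strip p := by
  unfold PySem.Chars.strip
  by_cases h : PySem.Chars.lstrip p = []
  · rw [pvLstrip_snoc_ws_of_nil p c hc h, h]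
  · rw [pvLstrip_snoc_ws_of_ne p c h, pvRstrip_snoc_ws _ _ hc]

lemma pvStrip_snoc_nonws (p : List Char) (c : Char) (hc : PySem.Chars.isspace c = false) :
    PySem.Chars.strip (p ++ [c]) = PySem.Chars.lstrip p ++ [c] := by
  unfold PySem.Chars.strip
  rw [pvLstrip_snoc_nonws p c hc]
  exact pvRstrip_eq_self _ (by simp [hc])

lemma pvLstrip_head_nonws (p : List Char) (c : Char) (h : (PySem.Chars.lstrip p).head? = some c) :
    PySem.Chars.isspace c = false := by
  unfold PySem.Chars.lstrip at h
  cases hl : p.dropWhile PySem.Chars.isspace with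
  | nil => rw [hl] at h; cases h
  | cons b u =>
      rw [hl] at h
      have hb : b = c := by simpa using h
      subst hb
      have := List.head?_dropWhile_not PySem.Chars.isspace p
      rw [hl] at this
      simpa using this

lemma pvRstrip_ne_nil (x : List Char) (c : Char) (hx : x.head? = some c)
    (hc : PySem.Chars.isspace c = false) : PySem.Chars.rstrip x ≠ [] := by
  unfold PySem.Chars.rstrip
  intro h
  have h2 : x.reverse.dropWhile PySem.Chars.isspace = [] := by
    simpa using congrArg List.reverse h
  rw [List.dropWhile_eq_nil_iff] at h2
  have : c ∈ x := by
    cases x with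
    | nil => cases hx
    | cons a t => simp at hx; simp [hx]
  have := h2 c (by simpa using this)
  simp [hc] at this

lemma pvStrip_eq_nil_iff (p : List Char) : PySem.Chars.strip p = [] ↔ PySem.Chars.lstrip p = [] := by
  constructor
  · intro h
    by_contra hne
    cases hl : PySem.Chars.lstrip p with
    | nil => exact hne hl
    | cons c t =>
        have hc := pvLstrip_head_nonws p c (by simp [hl])
        have := pvRstrip_ne_nil (c :: t) c (by simp) hc
        unfold PySem.Chars.strip at h
        rw [hl] at h
        exact this h
  · intro h
    unfold PySem.Chars.strip
    rw [h]
    rfl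

-- a list whose first and last characters are not whitespace
def pvNoEdgeSpace (cs : List Char) : Prop :=
  (∀ c ∈ cs.head?, PySem.Chars.isspace c = false) ∧ (∀ c ∈ cs.getLast?, PySem.Chars.isspace c = false)

lemma pvStrip_space_cons (cs : List Char) (h : pvNoEdgeSpace cs) :
    PySem.Chars.strip (' ' :: cs) = cs := by
  unfold PySem.Chars.strip
  have hsp : PySem.Chars.isspace ' ' = true := by decide
  have hl : PySem.Chars.lstrip (' ' :: cs) = PySem.Chars.lstrip cs := by
    simp [PySem.Chars.lstrip, hsp]
  rw [hl, pvLstrip_eq_self cs h.1, pvRstrip_eq_self cs h.2]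

lemma pvNoEdgeSpace_strip (w : List Char) : pvNoEdgeSpace (PySem.Chars.strip w) := by
  constructor
  · intro c hc
    unfold PySem.Chars.strip PySem.Chars.rstrip at hc
    rw [List.head?_reverse] at hc
    have hsfx : (PySem.Chars.lstrip w).reverse.dropWhile PySem.Chars.isspace <:+ (PySem.Chars.lstrip w).reverse :=
      List.dropWhile_suffix _
    obtain ⟨pre, hpre⟩ := hsfx
    cases hd : (PySem.Chars.lstrip w).reverse.dropWhile PySem.Chars.isspace with
    | nil => rw [hd] at hc; simp at hc
    | cons a t =>
        rw [hd] at hc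
        have hlast : (a :: t).getLast? = some c := hc
        have : (PySem.Chars.lstrip w).reverse.getLast? = some c := by
          rw [← hpre, hd, List.getLast?_append, hlast]; rfl
        rw [List.getLast?_reverse] at this
        exact pvLstrip_head_nonws w c this
  · intro c hc
    unfold PySem.Chars.strip PySem.Chars.rstrip at hc
    rw [List.getLast?_reverse] at hc
    cases hd : (PySem.Chars.lstrip w).reverse.dropWhile PySem.Chars.isspace with
    | nil => rw [hd] at hc; simp at hc
    | cons a t =>
        rw [hd] at hc
        have := List.head?_dropWhile_not PySem.Chars.isspace (PySem.Chars.lstrip w).reverse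
        rw [hd] at this
        have hac : a = c := by simpa using hc
        subst hac
        simpa using this

-- ---- A-side: the inner fold collapses, the outer fold concatenates ----

lemma pvFold_inner (cs : List Char) : ∀ (acc : List Char) (c0 : Char), acc.getLast? = some c0 →
    cs.foldl
      (fun word_new char =>
        if some char ≠ PySem.List.pyGet? word_new (-1) then word_new ++ [char] else word_new)
      acc = acc ++ pvColA c0 cs := by
  induction cs with
  | nil => intro acc c0 _; simp [pvColA]
  | cons c rest ih =>
      intro acc c0 hlast
      have hget : PySem.List.pyGet? acc (-1) = some c0 := by
        rw [PySem.List.pyGet?_neg_one, hlast]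
      rw [List.foldl_cons]
      by_cases h : c = c0
      · subst h
        rw [if_neg (by simp [hget]), ih acc c hlast]
        have : pvColA c (c :: rest) = pvColA c rest := by simp [pvColA]
        rw [this]
      · rw [if_pos (by simp [hget, h])]
        have hl : (acc ++ [c]).getLast? = some c := by simp
        rw [ih (acc ++ [c]) c hl]
        have : pvColA c0 (c :: rest) = c :: pvColA c rest := by simp [pvColA, h]
        rw [this, List.append_assoc]
        rfl

-- the per-word transformation: A's stripped inner fold is the collapse of the stripped word
lemma pvWord_eq (w : List Char) :
    PySem.Chars.strip
      ((PySem.Chars.strip w).foldl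
        (fun word_new char =>
          if some char ≠ PySem.List.pyGet? word_new (-1) then word_new ++ [char] else word_new)
        [' ']) = pvColF (PySem.Chars.strip w) := by
  have hfold := pvFold_inner (PySem.Chars.strip w) [' '] ' ' rfl
  rw [hfold]
  have hedge := pvNoEdgeSpace_strip w
  cases hs : PySem.Chars.strip w with
  | nil => simp [pvColA, pvColF, PySem.Chars.strip, PySem.Chars.lstrip, PySem.Chars.rstrip,
      PySem.Chars.isspace]
  | cons c t =>
      rw [hs] at hedge
      have hc : PySem.Chars.isspace c = false := hedge.1 c (by simp)
      have hcs : c ≠ ' ' := by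
        intro h; subst h; simp [PySem.Chars.isspace] at hc
      have hcol : pvColA ' ' (c :: t) = pvColF (c :: t) := by
        simp [pvColA, pvColF, hcs]
      rw [List.singleton_append, hcol]
      apply pvStrip_space_cons
      constructor
      · rw [pvColF_head?]; exact hedge.1
      · rw [pvColF_getLast?]; exact hedge.2

lemma pvFold_outer (f : List Char → List Char) (ps : List (List Char)) : ∀ s : List Char,
    ps.foldl (fun s_new word => s_new ++ f word ++ [' ']) s
      = s ++ (ps.map (fun w => f w ++ [' '])).flatten := by
  induction ps with
  | nil => intro s; simp
  | cons p t ih => intro s; rw [List.foldl_cons, ih]; simp [List.append_assoc]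

lemma pvStrip_append_space (x : List Char) :
    PySem.Chars.strip (x ++ [' ']) = PySem.Chars.strip x :=
  pvStrip_snoc_ws x ' ' (by decide)

-- trailing-space concatenation vs join-with-space, under a final strip
lemma pvFlatten_eq_join (gs : List (List Char)) (h : gs ≠ []) :
    (gs.map (fun g => g ++ [' '])).flatten = PySem.Chars.join [' '] gs ++ [' '] := by
  induction gs with
  | nil => exact absurd rfl h
  | cons g t ih =>
      cases t with
      | nil => simp [PySem.Chars.join, List.intercalate]
      | cons g2 t2 =>
          rw [List.map_cons, List.flatten_cons, ih (by simp)]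
          simp [PySem.Chars.join, List.intercalate, List.intersperse, List.append_assoc]

-- ---- B-side: the state-machine invariant ----

def pvInv (p buf pend : List Char) : Prop :=
  buf = pvColF (PySem.Chars.strip p) ∧ buf ++ pend = pvColF (PySem.Chars.lstrip p)

lemma pvStep_inv (c : Char) (hc : c ≠ ' ') (p buf pend : List Char)
    (words : List (List Char)) (h : pvInv p buf pend) :
    (pvStepB (words, buf, pend) c).1 = words ∧
      pvInv (p ++ [c]) (pvStepB (words, buf, pend) c).2.1 (pvStepB (words, buf, pend) c).2.2 := by
  obtain ⟨h1, h2⟩ := h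
  by_cases hws : PySem.Chars.isspace c = true
  · -- whitespace other than ' '
    by_cases hbuf : buf = []
    · -- before any content: nothing changes, the character is stripped
      have hstrip : PySem.Chars.strip p = [] :=
        (pvColF_eq_nil_iff _).mp (hbuf ▸ h1).symm
      have hl : PySem.Chars.lstrip p = [] := (pvStrip_eq_nil_iff p).mp hstrip
      have hpend : pend = [] := by
        have h2' := h2
        rw [hbuf, hl] at h2'
        simpa [pvColF] using h2'
      subst hbuf
      subst hpend
      have hstep : pvStepB (words, [], []) c = (words, [], []) := by
        simp [pvStepB, if_neg hc, hws]
      rw [hstep]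
      refine ⟨rfl, ?_, ?_⟩
      · rw [pvStrip_snoc_ws p c hws, hstrip]; rfl
      · rw [pvLstrip_snoc_ws_of_nil p c hws hl]; rfl
    · -- after content: extend (or not) the pending collapsed whitespace run
      have hstrip : PySem.Chars.strip p ≠ [] := by
        intro hcon
        exact hbuf (by rw [h1, hcon]; rfl)
      have hl : PySem.Chars.lstrip p ≠ [] := fun hcon =>
        hstrip ((pvStrip_eq_nil_iff p).mpr hcon)
      have hbp : (buf ++ pend).getLast? = (PySem.Chars.lstrip p).getLast? := by
        rw [h2, pvColF_getLast?]
      have hlast : (if pend ≠ [] then pend else buf).getLast? = (PySem.Chars.lstrip p).getLast? := by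
        by_cases hp : pend = []
        · simpa [hp] using hbp
        · rw [if_pos hp, ← hbp]
          cases pend using List.reverseRecOn with
          | nil => exact absurd rfl hp
          | append_singleton u a => rw [← List.append_assoc]; simp
      have hstep : pvStepB (words, buf, pend) c =
          if some c ≠ (if pend ≠ [] then pend else buf).getLast? then (words, buf, pend ++ [c])
          else (words, buf, pend) := by
        simp only [pvStepB, if_neg hc, hws, hbuf, ne_eq, not_false_eq_true, if_pos]
      rw [hstep]
      have hnew1 : PySem.Chars.strip (p ++ [c]) = PySem.Chars.strip p := pvStrip_snoc_ws p c hws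
      have hnew2 : PySem.Chars.lstrip (p ++ [c]) = PySem.Chars.lstrip p ++ [c] :=
        pvLstrip_snoc_ws_of_ne p c hl
      by_cases hcl : (PySem.Chars.lstrip p).getLast? = some c
      · rw [if_neg (by rw [hlast, hcl]; simp)]
        refine ⟨rfl, ?_, ?_⟩
        · rw [hnew1]; exact h1
        · rw [hnew2, pvColF_snoc, if_pos hcl]; exact h2
      · rw [if_pos (by rw [hlast]; exact fun hh => hcl hh.symm)]
        refine ⟨rfl, ?_, ?_⟩
        · rw [hnew1]; exact h1
        · rw [hnew2, pvColF_snoc, if_neg hcl, ← h2]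
          simp
  · -- content character: flush pending, append unless equal to the last kept char
    have hws' : PySem.Chars.isspace c = false := by simpa using hws
    have hbuf1 : (if pend ≠ [] then buf ++ pend else buf) = pvColF (PySem.Chars.lstrip p) := by
      by_cases hp : pend = [] <;> simp [hp, ← h2]
    have hstep : pvStepB (words, buf, pend) c =
        if pvColF (PySem.Chars.lstrip p) = [] ∨ some c ≠ (pvColF (PySem.Chars.lstrip p)).getLast?
        then (words, pvColF (PySem.Chars.lstrip p) ++ [c], ([] : List Char))
        else (words, pvColF (PySem.Chars.lstrip p), ([] : List Char)) := by
      simp only [pvStepB, if_neg hc, hws', Bool.false_eq_true, if_false, hbuf1]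
    rw [hstep]
    have hnew1 : PySem.Chars.strip (p ++ [c]) = PySem.Chars.lstrip p ++ [c] :=
      pvStrip_snoc_nonws p c hws'
    have hnew2 : PySem.Chars.lstrip (p ++ [c]) = PySem.Chars.lstrip p ++ [c] :=
      pvLstrip_snoc_nonws p c hws'
    have hgl : (pvColF (PySem.Chars.lstrip p)).getLast? = (PySem.Chars.lstrip p).getLast? :=
      pvColF_getLast? _
    by_cases hcl : (PySem.Chars.lstrip p).getLast? = some c
    · have hne : pvColF (PySem.Chars.lstrip p) ≠ [] := by
        intro hcon
        rw [hcon] at hgl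
        rw [← hgl] at hcl
        cases hcl
      rw [if_neg (by simp [hgl, hcl, hne])]
      refine ⟨rfl, ?_, ?_⟩
      · rw [hnew1, pvColF_snoc, if_pos hcl]
      · rw [hnew2, pvColF_snoc, if_pos hcl]; simp
    · rw [if_pos (Or.inr (by rw [hgl]; exact fun hh => hcl hh.symm))]
      refine ⟨rfl, ?_, ?_⟩
      · rw [hnew1, pvColF_snoc, if_neg hcl]
      · rw [hnew2, pvColF_snoc, if_neg hcl]; simp

lemma pvBmain : ∀ (l p buf pend : List Char) (words : List (List Char)),
    (∀ c ∈ p, c ≠ ' ') → pvInv p buf pend →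
    (l.foldl pvStepB (words, buf, pend)).1 ++ [(l.foldl pvStepB (words, buf, pend)).2.1]
      = words ++ (pvMySplit (p ++ l)).map (fun w => pvColF (PySem.Chars.strip w)) := by
  intro l
  induction l with
  | nil =>
      intro p buf pend words hfree h
      simp only [List.foldl_nil, List.append_nil]
      rw [pvMySplit_no_space p hfree]
      simp [h.1]
  | cons c rest ih =>
      intro p buf pend words hfree h
      rw [List.foldl_cons]
      by_cases hc : c = ' '
      · subst hc
        have hstep : pvStepB (words, buf, pend) ' ' = (words ++ [buf], [], []) := by
          simp [pvStepB]
        rw [hstep, ih [] [] [] (words ++ [buf]) (by simp) ⟨rfl, rfl⟩]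
        rw [pvMySplit_append_space p rest hfree]
        simp [h.1, List.append_assoc]
      · obtain ⟨hw, hinv⟩ := pvStep_inv c hc p buf pend words h
        have hfree' : ∀ d ∈ p ++ [c], d ≠ ' ' := by
          intro d hd
          rcases List.mem_append.mp hd with hd | hd
          · exact hfree d hd
          · simp at hd; subst hd; exact hc
        have := ih (p ++ [c]) (pvStepB (words, buf, pend) c).2.1
          (pvStepB (words, buf, pend) c).2.2 (pvStepB (words, buf, pend) c).1 hfree' hinv
        rw [show (pvStepB (words, buf, pend) c) =
            ((pvStepB (words, buf, pend) c).1, (pvStepB (words, buf, pend) c).2.1,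
              (pvStepB (words, buf, pend) c).2.2) from rfl] at this ⊢
        rw [this, hw]
        rw [show p ++ c :: rest = (p ++ [c]) ++ rest by simp]

-- ---- strip of a join vs trimming empty words ----

lemma pvJoin_cons (g : List Char) (t : List (List Char)) (h : t ≠ []) :
    PySem.Chars.join [' '] (g :: t) = g ++ ' ' :: PySem.Chars.join [' '] t := by
  cases t with
  | nil => exact absurd rfl h
  | cons g2 t2 => rw [PySem.Chars.join_cons_cons]; simp

lemma pvJoin_append_singleton (t : List (List Char)) (g : List Char) (h : t ≠ []) :
    PySem.Chars.join [' '] (t ++ [g]) = PySem.Chars.join [' '] t ++ ' ' :: g := by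
  induction t with
  | nil => exact absurd rfl h
  | cons g2 t2 ih =>
      cases t2 with
      | nil => simp [PySem.Chars.join_singleton, pvJoin_cons]
      | cons g3 t3 =>
          have h1 : PySem.Chars.join [' '] ((g2 :: g3 :: t3) ++ [g])
              = g2 ++ ' ' :: PySem.Chars.join [' '] ((g3 :: t3) ++ [g]) := by
            rw [List.cons_append]
            exact pvJoin_cons _ _ (by simp)
          rw [h1, ih (by simp), pvJoin_cons g2 (g3 :: t3) (by simp)]
          simp

lemma pvLstrip_join (gs : List (List Char)) (h : ∀ g ∈ gs, pvNoEdgeSpace g) :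
    PySem.Chars.lstrip (PySem.Chars.join [' '] gs)
      = PySem.Chars.join [' '] (gs.dropWhile (·.isEmpty)) := by
  induction gs with
  | nil => simp [PySem.Chars.join_nil]; rfl
  | cons g t ih =>
      by_cases hg : g = []
      · subst hg
        have hd : (([] : List Char) :: t).dropWhile (·.isEmpty) = t.dropWhile (·.isEmpty) := by
          simp
        rw [hd]
        cases t with
        | nil => simp [PySem.Chars.join_singleton]; rfl
        | cons g2 t2 =>
            rw [pvJoin_cons _ _ (by simp), List.nil_append]
            have hsp : PySem.Chars.lstrip (' ' :: PySem.Chars.join [' '] (g2 :: t2))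
                = PySem.Chars.lstrip (PySem.Chars.join [' '] (g2 :: t2)) := by
              simp [PySem.Chars.lstrip,
                show PySem.Chars.isspace ' ' = true from by decide]
            rw [hsp, ih (fun g hg => h g (by simp [hg]))]
      · have hhead : ∃ d u, g = d :: u := by
          cases g with
          | nil => exact absurd rfl hg
          | cons d u => exact ⟨d, u, rfl⟩
        obtain ⟨d, u, rfl⟩ := hhead
        have hdns : PySem.Chars.isspace d = false := (h (d :: u) (by simp)).1 d (by simp)
        have hd : ((d :: u) :: t).dropWhile (·.isEmpty) = (d :: u) :: t := by
          simp
        rw [hd]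
        cases t with
        | nil =>
            rw [PySem.Chars.join_singleton]
            apply pvLstrip_eq_self
            intro c hc
            simp at hc
            rw [← hc]; exact hdns
        | cons g2 t2 =>
            rw [pvJoin_cons _ _ (by simp)]
            apply pvLstrip_eq_self
            intro c hc
            simp at hc
            rw [← hc]; exact hdns

lemma pvRstrip_join (gs : List (List Char)) (h : ∀ g ∈ gs, pvNoEdgeSpace g) :
    PySem.Chars.rstrip (PySem.Chars.join [' '] gs)
      = PySem.Chars.join [' '] ((gs.reverse.dropWhile (·.isEmpty)).reverse) := by
  induction gs using List.reverseRecOn with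
  | nil => simp [PySem.Chars.join_nil]; rfl
  | append_singleton t g ih =>
      by_cases hg : g = []
      · subst hg
        have hd : ((t ++ [([] : List Char)]).reverse.dropWhile (·.isEmpty))
            = t.reverse.dropWhile (·.isEmpty) := by
          simp
        rw [hd]
        cases ht : t with
        | nil => simp [PySem.Chars.join_singleton]; rfl
        | cons g2 t2 =>
            rw [← ht, pvJoin_append_singleton t [] (by rw [ht]; simp)]
            have : PySem.Chars.join [' '] t ++ ' ' :: ([] : List Char)
                = PySem.Chars.join [' '] t ++ [' '] := by simp
            rw [this, pvRstrip_snoc_ws _ _ (by decide)]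
            exact ih (fun g hgm => h g (by simp [hgm]))
      · have hlastg : ∃ u a, g = u ++ [a] := by
          cases hgr : g.reverse with
          | nil => exact absurd (by simpa using congrArg List.reverse hgr) hg
          | cons a v => exact ⟨v.reverse, a, by simpa using congrArg List.reverse hgr⟩
        obtain ⟨u, a, rfl⟩ := hlastg
        have hans : PySem.Chars.isspace a = false :=
          (h (u ++ [a]) (by simp)).2 a (by simp)
        have hd : ((t ++ [u ++ [a]]).reverse.dropWhile (·.isEmpty)).reverse = t ++ [u ++ [a]] := by
          simp
        rw [hd]
        apply pvRstrip_eq_self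
        intro c hc
        cases ht : t with
        | nil =>
            rw [ht] at hc
            simp only [List.nil_append, PySem.Chars.join_singleton] at hc
            simp at hc
            rw [← hc]; exact hans
        | cons g2 t2 =>
            rw [pvJoin_append_singleton t (u ++ [a]) (by rw [ht]; simp)] at hc
            have : (PySem.Chars.join [' '] t ++ ' ' :: (u ++ [a])).getLast? = some a := by
              rw [show PySem.Chars.join [' '] t ++ ' ' :: (u ++ [a])
                  = (PySem.Chars.join [' '] t ++ ' ' :: u) ++ [a] by simp]
              exact List.getLast?_concat
            rw [this] at hc
            simp at hc
            rw [← hc]; exact hans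

lemma pvStrip_join (gs : List (List Char)) (h : ∀ g ∈ gs, pvNoEdgeSpace g) :
    PySem.Chars.strip (PySem.Chars.join [' '] gs)
      = PySem.Chars.join [' '] (((gs.dropWhile (·.isEmpty)).reverse.dropWhile (·.isEmpty)).reverse) := by
  unfold PySem.Chars.strip
  rw [pvLstrip_join gs h, pvRstrip_join _ (fun g hg => h g ((List.dropWhile_sublist _).subset hg))]

-- ===== VERDICT (by name: the statement is the Claim_ definition above) =====
theorem normalize_elonge_word_spec : Claim_equal_normalize_elonge_word := by
  intro sent _
  unfold Spec_normalize_elonge_word normalize_elonge_word normalize_elonge_word_alt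
  simp only []
  rw [pvSplitOn_eq, pvFold_outer, List.nil_append]
  have hcong : (pvMySplit sent.toList).map
      (fun w => PySem.Chars.strip
        ((PySem.Chars.strip w).foldl
          (fun word_new char =>
            if some char ≠ PySem.List.pyGet? word_new (-1) then word_new ++ [char] else word_new)
          [' ']) ++ [' '])
      = (pvMySplit sent.toList).map (fun w => pvColF (PySem.Chars.strip w) ++ [' ']) := by
    apply List.map_congr_left
    intro w _
    rw [pvWord_eq]
  rw [hcong]
  have hgs : (pvMySplit sent.toList).map (fun w => pvColF (PySem.Chars.strip w)) ≠ [] := by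
    simp [pvMySplit_ne_nil]
  have hedge : ∀ g ∈ (pvMySplit sent.toList).map (fun w => pvColF (PySem.Chars.strip w)),
      pvNoEdgeSpace g := by
    intro g hg
    simp only [List.mem_map] at hg
    obtain ⟨w, hw, rfl⟩ := hg
    exact ⟨by rw [pvColF_head?]; exact (pvNoEdgeSpace_strip w).1,
      by rw [pvColF_getLast?]; exact (pvNoEdgeSpace_strip w).2⟩
  rw [show (fun w => pvColF (PySem.Chars.strip w) ++ [' '])
        = ((fun g => g ++ [' ']) ∘ (fun w => pvColF (PySem.Chars.strip w))) from rfl,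
    ← List.map_map]
  rw [pvFlatten_eq_join _ hgs, pvStrip_append_space, pvStrip_join _ hedge]
  rw [pvBmain sent.toList [] [] [] [] (by simp) ⟨rfl, rfl⟩]
  simp
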